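-- pv_equiv track=rewrite | github.com/SOLUCAOSISTEMASMS/LEADFY | app.py | validar_cnpj
-- ===== SOURCE A (Python) =====
-- def validar_cnpj(cnpj):
--     cnpj = ''.join(filter(str.isdigit, cnpj))
--     if len(cnpj) != 14 or cnpj == cnpj[0] * 14:
--         return False
--     pesos1 = [5, 4, 3, 2, 9, 8, 7, 6, 5, 4, 3, 2]
--     soma1 = sum(int(cnpj[i]) * pesos1[i] for i in range(12))
--     digito1 = 11 - (soma1 % 11)
--     digito1 = digito1 if digito1 < 10 else 0
--
--     pesos2 = [6] + pesos1
--     soma2 = sum(int(cnpj[i]) * pesos2[i] for i in range(13))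
--     digito2 = 11 - (soma2 % 11)
--     digito2 = digito2 if digito2 < 10 else 0
--
--     return cnpj[-2:] == f"{digito1}{digito2}"
-- ===== SOURCE B (Python) =====
-- def validar_cnpj(cnpj):
--     digits = [ord(c) - 48 for c in cnpj if '0' <= c <= '9']
--     if len(digits) != 14 or all(d == digits[0] for d in digits):
--         return False
--     # Divisibility test: with the check digit included at weight 1, a valid code has
--     # weighted sum = 0 (mod 11); the classic "digit 10 becomes 0" rule shows up as the
--     # one extra case where the digit is 0 and the residue is 1.  Both sums in one pass.
--     W1 = (5, 4, 3, 2, 9, 8, 7, 6, 5, 4, 3, 2, 1, 0)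
--     W2 = (6, 5, 4, 3, 2, 9, 8, 7, 6, 5, 4, 3, 2, 1)
--     s1 = s2 = 0
--     for d, w1, w2 in zip(digits, W1, W2):
--         s1 += d * w1
--         s2 += d * w2
--     ok1 = s1 % 11 == 0 or (digits[12] == 0 and s1 % 11 == 1)
--     ok2 = s2 % 11 == 0 or (digits[13] == 0 and s2 % 11 == 1)
--     return ok1 and ok2
-- ===== Notes on version B (the rewrite author's own statement) =====
-- stated objective: alternative
-- what changed: Instead of computing each check digit via 11-(soma%11) with the <10 branch and comparing formatted strings, B runs one zip pass accumulating both weighted sums with the check digits themselves included at weight 1 and accepts iff each sum is divisible by 11 (or the digit is 0 with residue 1, the classic 'digit 10 becomes 0' exception) - a divisibility test, not a digit computation.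
import Mathlib
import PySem

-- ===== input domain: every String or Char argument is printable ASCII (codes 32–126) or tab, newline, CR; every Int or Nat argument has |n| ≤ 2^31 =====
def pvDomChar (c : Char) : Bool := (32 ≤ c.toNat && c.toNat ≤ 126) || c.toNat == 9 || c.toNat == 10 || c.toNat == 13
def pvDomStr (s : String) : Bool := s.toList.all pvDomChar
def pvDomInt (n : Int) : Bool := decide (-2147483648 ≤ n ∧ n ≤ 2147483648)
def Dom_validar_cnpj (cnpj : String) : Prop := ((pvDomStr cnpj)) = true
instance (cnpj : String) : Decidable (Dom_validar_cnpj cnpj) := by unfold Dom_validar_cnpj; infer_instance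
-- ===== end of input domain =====

-- B replaces A's per-digit computation (11 - soma%11, <10 branch, string formatting) by a
-- mod-11 divisibility test on sums that include the check digits at weight 1, both sums
-- accumulated in one zip pass (objective: alternative).

-- ===== PORT A =====
-- int(c) for an ASCII digit char (exact: isdigit keeps exactly '0'..'9')
def pvDigitVal (c : Char) : Int := (c.toNat : Int) - 48

def validar_cnpj (cnpj : String) : Bool :=
  -- cnpj = ''.join(filter(str.isdigit, cnpj))
  let ds : List Char := cnpj.toList.filter PySem.Chars.isdigit
  -- if len(cnpj) != 14 or cnpj == cnpj[0] * 14: return False   (nested ifs = Python's short-circuit `or`;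
  -- headD is only reached when ds is nonempty, matching cnpj[0])
  if ds.length ≠ 14 then false
  else if ds = PySem.List.pyRepeat [ds.headD ' '] 14 then false
  else
    let pesos1 : List Int := [5, 4, 3, 2, 9, 8, 7, 6, 5, 4, 3, 2]
    let soma1 : Int := ((PySem.List.pyRange 0 12 1).map
      (fun i => pvDigitVal (PySem.List.pyGetD ds i ' ') * PySem.List.pyGetD pesos1 i 0)).sum
    let digito1 : Int := 11 - PySem.Int.mod soma1 11
    let digito1 : Int := if digito1 < 10 then digito1 else 0
    let pesos2 : List Int := 6 :: pesos1
    let soma2 : Int := ((PySem.List.pyRange 0 13 1).map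
      (fun i => pvDigitVal (PySem.List.pyGetD ds i ' ') * PySem.List.pyGetD pesos2 i 0)).sum
    let digito2 : Int := 11 - PySem.Int.mod soma2 11
    let digito2 : Int := if digito2 < 10 then digito2 else 0
    -- return cnpj[-2:] == f"{digito1}{digito2}"
    PySem.List.slice ds (some (-2)) none = PySem.Int.toChars digito1 ++ PySem.Int.toChars digito2

-- ===== PORT B =====
def validar_cnpj_alt (cnpj : String) : Bool :=
  -- digits = [ord(c) - 48 for c in cnpj if '0' <= c <= '9']
  let digits : List Int := (cnpj.toList.filter (fun c => decide ('0' ≤ c ∧ c ≤ '9'))).map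
    (fun c => (c.toNat : Int) - 48)
  if digits.length ≠ 14 then false
  else if digits.all (fun d => d == digits.headD 0) then false
  else
    let W1 : List Int := [5, 4, 3, 2, 9, 8, 7, 6, 5, 4, 3, 2, 1, 0]
    let W2 : List Int := [6, 5, 4, 3, 2, 9, 8, 7, 6, 5, 4, 3, 2, 1]
    -- for d, w1, w2 in zip(digits, W1, W2): s1 += d*w1; s2 += d*w2
    let s : Int × Int := (digits.zip (W1.zip W2)).foldl
      (fun (s : Int × Int) t => (s.1 + t.1 * t.2.1, s.2 + t.1 * t.2.2)) (0, 0)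
    -- digits[12] / digits[13] are in range (length = 14), so pyGetD is exact here
    let ok1 : Bool := PySem.Int.mod s.1 11 == 0 ||
      (PySem.List.pyGetD digits 12 0 == 0 && PySem.Int.mod s.1 11 == 1)
    let ok2 : Bool := PySem.Int.mod s.2 11 == 0 ||
      (PySem.List.pyGetD digits 13 0 == 0 && PySem.Int.mod s.2 11 == 1)
    ok1 && ok2

-- ===== PRECONDITION & SPEC =====
def Spec_validar_cnpj (cnpj : String) (out : Bool) : Prop := out = validar_cnpj_alt cnpj
instance (cnpj : String) (out : Bool) : Decidable (Spec_validar_cnpj cnpj out) := by unfold Spec_validar_cnpj; infer_instance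

-- ===== CLAIM (what is proved, stated in full; the proofs are below) =====
def Claim_equal_validar_cnpj : Prop := ∀ (cnpj : String), Dom_validar_cnpj cnpj → Spec_validar_cnpj cnpj (validar_cnpj cnpj)

-- ===== LEMMAS AND PROOFS =====

theorem char_eq_iff_toNat (a b : Char) : a = b ↔ a.toNat = b.toNat :=
  ⟨fun h => h ▸ rfl, fun h => Char.ext (UInt32.toNat_inj.mp h)⟩

theorem isdigit_eq_cmp (c : Char) : PySem.Chars.isdigit c = decide ('0' ≤ c ∧ c ≤ '9') := by
  simp [PySem.Chars.isdigit, Char.le_def]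

theorem toChars_eq_digit (g : Int) (c : Char) (hg0 : 0 ≤ g) (hg9 : g ≤ 9) :
    (PySem.Int.toChars g = [c]) ↔ ((c.toNat : Int) - 48 = g) := by
  have e0 : PySem.Int.toChars 0 = ['0'] := by decide
  have e1 : PySem.Int.toChars 1 = ['1'] := by decide
  have e2 : PySem.Int.toChars 2 = ['2'] := by decide
  have e3 : PySem.Int.toChars 3 = ['3'] := by decide
  have e4 : PySem.Int.toChars 4 = ['4'] := by decide
  have e5 : PySem.Int.toChars 5 = ['5'] := by decide
  have e6 : PySem.Int.toChars 6 = ['6'] := by decide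
  have e7 : PySem.Int.toChars 7 = ['7'] := by decide
  have e8 : PySem.Int.toChars 8 = ['8'] := by decide
  have e9 : PySem.Int.toChars 9 = ['9'] := by decide
  interval_cases g <;> simp [e0, e1, e2, e3, e4, e5, e6, e7, e8, e9, char_eq_iff_toNat] <;> omega

theorem toChars_pair (c d : Char) (g1 g2 : Int) (hg10 : 0 ≤ g1) (hg19 : g1 ≤ 9)
    (hg20 : 0 ≤ g2) (hg29 : g2 ≤ 9) :
    ([c, d] = PySem.Int.toChars g1 ++ PySem.Int.toChars g2) ↔
      (((c.toNat : Int) - 48 = g1) ∧ ((d.toNat : Int) - 48 = g2)) := by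
  obtain ⟨x, hx⟩ : ∃ x, PySem.Int.toChars g1 = [x] := by interval_cases g1 <;> exact ⟨_, rfl⟩
  obtain ⟨y, hy⟩ : ∃ y, PySem.Int.toChars g2 = [y] := by interval_cases g2 <;> exact ⟨_, rfl⟩
  have h1 : (c = x) ↔ ((c.toNat : Int) - 48 = g1) := by
    rw [← toChars_eq_digit g1 c hg10 hg19, hx]
    simp [eq_comm]
  have h2 : (d = y) ↔ ((d.toNat : Int) - 48 = g2) := by
    rw [← toChars_eq_digit g2 d hg20 hg29, hy]
    simp [eq_comm]
  rw [hx, hy]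
  simp [← h1, ← h2]

theorem fmod_pos (a : Int) : PySem.Int.mod a 11 = a % 11 := by
  simp [PySem.Int.mod, Int.fmod_eq_emod]

-- the divisibility test at weight 1 is equivalent to the 11-(S%11) check-digit computation
theorem check1 (S d : Int) (hd0 : 0 ≤ d) (hd9 : d ≤ 9) :
    (d = if 11 - S % 11 < 10 then 11 - S % 11 else 0) ↔
      ((S + d) % 11 = 0 ∨ d = 0 ∧ (S + d) % 11 = 1) := by
  split_ifs <;> omega

-- ===== VERDICT (by name: the statement is the Claim_ definition above) =====
theorem validar_cnpj_spec : Claim_equal_validar_cnpj := by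
  intro cnpj _
  unfold Spec_validar_cnpj validar_cnpj validar_cnpj_alt
  simp only [← isdigit_eq_cmp]
  set ds : List Char := cnpj.toList.filter PySem.Chars.isdigit with hds
  have hdig : ∀ c ∈ ds, PySem.Chars.isdigit c = true := by
    intro c hc
    exact (List.mem_filter.mp (hds ▸ hc)).2
  clear_value ds
  by_cases hlen : ds.length = 14
  case neg => simp [hlen]
  case pos =>
    rcases ds with _ | ⟨c0, _ | ⟨c1, _ | ⟨c2, _ | ⟨c3, _ | ⟨c4, _ | ⟨c5, _ | ⟨c6, _ | ⟨c7, _ | ⟨c8, _ | ⟨c9, _ | ⟨c10, _ | ⟨c11, _ | ⟨c12, _ | ⟨c13, t⟩⟩⟩⟩⟩⟩⟩⟩⟩⟩⟩⟩⟩⟩ <;> try (simp only [List.length_cons, List.length_nil] at hlen; try omega)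
    rcases t with _ | ⟨x, t⟩
    case cons.cons.cons.cons.cons.cons.cons.cons.cons.cons.cons.cons.cons.cons.cons => exfalso; revert hlen; simp
    have hb12 : 48 ≤ c12.toNat ∧ c12.toNat ≤ 57 := by
      have h := hdig c12 (by simp)
      rw [isdigit_eq_cmp] at h
      have h2 := of_decide_eq_true h
      exact ⟨Char.le_def.mp h2.1, Char.le_def.mp h2.2⟩
    have hb13 : 48 ≤ c13.toNat ∧ c13.toNat ≤ 57 := by
      have h := hdig c13 (by simp)
      rw [isdigit_eq_cmp] at h
      have h2 := of_decide_eq_true h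
      exact ⟨Char.le_def.mp h2.1, Char.le_def.mp h2.2⟩
    rw [Bool.eq_iff_iff]
    simp only [PySem.List.slice, PySem.List.clampIdx, PySem.List.pyRepeat_singleton, fmod_pos, pvDigitVal,
      List.map_cons, List.map_nil, List.length_cons, List.length_nil, List.all_cons, List.all_nil, List.headD, List.zip_cons_cons, List.foldl_cons,
      PySem.List.pyRange, PySem.List.pyGetD, PySem.List.pyGet?, PySem.List.pyIdx?]
    norm_num [Int.toNat, List.take_succ_cons, List.take_zero, List.range_succ,
      List.replicate, char_eq_iff_toNat, Function.comp, List.map_append]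
    intro _
    rw [toChars_pair c12 c13 _ _ (by split_ifs <;> omega) (by split_ifs <;> omega)
      (by split_ifs <;> omega) (by split_ifs <;> omega)]
    have hb12' : (48:Int) ≤ (c12.toNat:Int) ∧ ((c12.toNat:Int)) ≤ 57 := by
      exact ⟨by exact_mod_cast hb12.1, by exact_mod_cast hb12.2⟩
    have hb13' : (48:Int) ≤ (c13.toNat:Int) ∧ ((c13.toNat:Int)) ≤ 57 := by
      exact ⟨by exact_mod_cast hb13.1, by exact_mod_cast hb13.2⟩
    rw [check1 _ _ (by omega) (by omega), check1 _ _ (by omega) (by omega)]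
    simp only [Int.dvd_iff_emod_eq_zero]
    ring_nf
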